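-- pv_equiv track=rewrite | github.com/markberry2010/xword | src/crossword/grid.py | _creates_short_word
-- ===== SOURCE A (Python) =====
-- def _creates_short_word(size: int, blacks: set, r: int, c: int) -> bool:
--     """Check if adding a black at (r,c) creates any word shorter than 3."""
--     # Check the horizontal word segments adjacent to (r,c)
--     for dr, dc in [(0, 1), (1, 0)]:  # horizontal, vertical
--         # Check segment before (r,c)
--         length = 0
--         nr, nc = r - dr, c - dc
--         while 0 <= nr < size and 0 <= nc < size and (nr, nc) not in blacks:
--             length += 1
--             nr -= dr
--             nc -= dc
--         if 1 <= length <= 2: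
--             return True
--
--         # Check segment after (r,c)
--         length = 0
--         nr, nc = r + dr, c + dc
--         while 0 <= nr < size and 0 <= nc < size and (nr, nc) not in blacks:
--             length += 1
--             nr += dr
--             nc += dc
--         if 1 <= length <= 2:
--             return True
--
--     return False
-- ===== SOURCE B (Python) =====
-- def _creates_short_word(size: int, blacks: set, r: int, c: int) -> bool:
--     """O(1) closed-form check: a short segment exists in a direction iff the
--     first cell along it is open and the second or third is not."""
--     def short_in(dr, dc):
--         def valid(k):
--             nr, nc = r + dr * k, c + dc * k
--             return 0 <= nr < size and 0 <= nc < size and (nr, nc) not in blacks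
--         return valid(1) and (not valid(2) or not valid(3))
--     return any(short_in(dr, dc) for dr, dc in ((0, 1), (1, 0), (0, -1), (-1, 0)))
-- ===== Notes on version B (the rewrite author's own statement) =====
-- stated objective: alternative
-- what changed: Replaces A's per-direction while-loops that count a segment's length with a closed-form O(1) test of the first three offsets in each of the four directions (short segment iff offset 1 is open and offset 2 or 3 is not).
import Mathlib
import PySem

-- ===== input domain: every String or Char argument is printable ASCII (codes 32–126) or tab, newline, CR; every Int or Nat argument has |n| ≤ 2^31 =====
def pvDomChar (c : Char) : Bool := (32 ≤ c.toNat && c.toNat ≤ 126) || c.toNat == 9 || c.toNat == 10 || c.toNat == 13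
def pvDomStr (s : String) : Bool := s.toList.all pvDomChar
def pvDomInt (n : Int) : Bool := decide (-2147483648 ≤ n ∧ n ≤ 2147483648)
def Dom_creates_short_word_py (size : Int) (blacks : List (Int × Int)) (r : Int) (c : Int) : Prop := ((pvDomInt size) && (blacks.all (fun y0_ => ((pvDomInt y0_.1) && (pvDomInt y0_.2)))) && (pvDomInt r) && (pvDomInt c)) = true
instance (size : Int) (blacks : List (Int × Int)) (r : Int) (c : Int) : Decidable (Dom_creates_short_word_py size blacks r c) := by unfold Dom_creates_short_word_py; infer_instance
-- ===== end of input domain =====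

-- Header: B replaces A's per-direction counting while-loops by a closed-form
-- check of the first three offsets in each of the four directions (alternative form, O(1) offset checks per direction).

-- ===== PORT A =====
-- the while loop: count open in-grid cells starting at (nr,nc), stepping by (sdr,sdc).
-- fuel (size.toNat + 3) is a totality guard only: the loop takes at most size.toNat steps.
def loopLen (size : Int) (blacks : List (Int × Int)) : Nat → Int → Int → Int → Int → Int
  | 0, _, _, _, _ => 0
  | f + 1, nr, nc, sdr, sdc =>
    if 0 ≤ nr ∧ nr < size ∧ 0 ≤ nc ∧ nc < size ∧ ¬ ((nr, nc) ∈ blacks) then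
      1 + loopLen size blacks f (nr + sdr) (nc + sdc) sdr sdc
    else 0

-- the 'for dr, dc in [(0,1),(1,0)]' loop with its early returns
def dirCheckA (size : Int) (blacks : List (Int × Int)) (r : Int) (c : Int) : List (Int × Int) → Bool
  | [] => false
  | (dr, dc) :: rest =>
    let l1 := loopLen size blacks (size.toNat + 3) (r - dr) (c - dc) (-dr) (-dc)
    if 1 ≤ l1 ∧ l1 ≤ 2 then true
    else
      let l2 := loopLen size blacks (size.toNat + 3) (r + dr) (c + dc) dr dc
      if 1 ≤ l2 ∧ l2 ≤ 2 then true
      else dirCheckA size blacks r c rest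

def creates_short_word_py (size : Int) (blacks : List (Int × Int)) (r : Int) (c : Int) : Bool :=
  dirCheckA size blacks r c [(0, 1), (1, 0)]

-- ===== PORT B =====
-- valid(k) of Source B: cell k steps away in direction (dr,dc) is in the grid and not black
def validB (size : Int) (blacks : List (Int × Int)) (r c dr dc k : Int) : Bool :=
  decide (0 ≤ r + dr * k ∧ r + dr * k < size ∧ 0 ≤ c + dc * k ∧ c + dc * k < size ∧
          ¬ ((r + dr * k, c + dc * k) ∈ blacks))

def shortInDir (size : Int) (blacks : List (Int × Int)) (r c dr dc : Int) : Bool :=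
  validB size blacks r c dr dc 1 &&
    (!validB size blacks r c dr dc 2 || !validB size blacks r c dr dc 3)

def creates_short_word_py_alt (size : Int) (blacks : List (Int × Int)) (r : Int) (c : Int) : Bool :=
  [((0 : Int), (1 : Int)), (1, 0), (0, -1), (-1, 0)].any
    (fun d => shortInDir size blacks r c d.1 d.2)

-- ===== PRECONDITION & SPEC =====
def Spec_creates_short_word_py (size : Int) (blacks : List (Int × Int)) (r : Int) (c : Int) (out : Bool) : Prop := out = creates_short_word_py_alt size blacks r c
instance (size : Int) (blacks : List (Int × Int)) (r : Int) (c : Int) (out : Bool) : Decidable (Spec_creates_short_word_py size blacks r c out) := by unfold Spec_creates_short_word_py; infer_instance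

-- ===== CLAIM (what is proved, stated in full; the proofs are below) =====
def Claim_equal_creates_short_word_py : Prop := ∀ (size : Int) (blacks : List (Int × Int)) (r : Int) (c : Int), Dom_creates_short_word_py size blacks r c → Spec_creates_short_word_py size blacks r c (creates_short_word_py size blacks r c)

-- ===== LEMMAS AND PROOFS =====

lemma loopLen_nonneg (size : Int) (blacks : List (Int × Int)) :
    ∀ (f : Nat) (nr nc sdr sdc : Int), 0 ≤ loopLen size blacks f nr nc sdr sdc := by
  intro f
  induction f with
  | zero => intro nr nc sdr sdc; simp [loopLen]
  | succ f ih =>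
    intro nr nc sdr sdc
    simp only [loopLen]
    split_ifs with h
    · have := ih (nr + sdr) (nc + sdc) sdr sdc; omega
    · omega

-- cell (x,y) is in the grid and not black
def inb (size : Int) (blacks : List (Int × Int)) (x y : Int) : Bool :=
  decide (0 ≤ x ∧ x < size ∧ 0 ≤ y ∧ y < size ∧ ¬ ((x, y) ∈ blacks))

-- "a segment of length 1 or 2 starts at (x,y) in direction (sdr,sdc)"
def segShort (size : Int) (blacks : List (Int × Int)) (x y sdr sdc : Int) : Bool :=
  inb size blacks x y &&
    (!inb size blacks (x + sdr) (y + sdc) || !inb size blacks (x + sdr + sdr) (y + sdc + sdc))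

-- the characterization of '1 ≤ loop length ≤ 2' by the first three cells, for any fuel ≥ 3
lemma key (size : Int) (blacks : List (Int × Int)) (f : Nat) (nr nc sdr sdc : Int) :
    decide (1 ≤ loopLen size blacks (f + 3) nr nc sdr sdc ∧
            loopLen size blacks (f + 3) nr nc sdr sdc ≤ 2)
    = segShort size blacks nr nc sdr sdc := by
  have h4 := loopLen_nonneg size blacks f (nr + sdr + sdr + sdr) (nc + sdc + sdc + sdc) sdr sdc
  show decide _ = _
  simp only [loopLen]
  by_cases h1 : (0 ≤ nr ∧ nr < size ∧ 0 ≤ nc ∧ nc < size ∧ ¬ ((nr, nc) ∈ blacks)) <;>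
  by_cases h2 : (0 ≤ nr + sdr ∧ nr + sdr < size ∧ 0 ≤ nc + sdc ∧ nc + sdc < size ∧
                 ¬ ((nr + sdr, nc + sdc) ∈ blacks)) <;>
  by_cases h3 : (0 ≤ nr + sdr + sdr ∧ nr + sdr + sdr < size ∧ 0 ≤ nc + sdc + sdc ∧
                 nc + sdc + sdc < size ∧ ¬ ((nr + sdr + sdr, nc + sdc + sdc) ∈ blacks)) <;>
    simp [segShort, inb, h1, h2, h3] <;> omega

-- B's shortInDir, re-expressed over the cell one step away
lemma shortInDir_eq (size : Int) (blacks : List (Int × Int)) (r c dr dc : Int) :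
    shortInDir size blacks r c dr dc = segShort size blacks (r + dr) (c + dc) dr dc := by
  have h1 : r + dr * 1 = r + dr := by ring
  have h2 : r + dr * 2 = r + dr + dr := by ring
  have h3 : r + dr * 3 = r + dr + dr + dr := by ring
  have g1 : c + dc * 1 = c + dc := by ring
  have g2 : c + dc * 2 = c + dc + dc := by ring
  have g3 : c + dc * 3 = c + dc + dc + dc := by ring
  simp only [shortInDir, validB, segShort, inb, h1, h2, h3, g1, g2, g3]

theorem creates_short_word_py_spec_aux (size : Int) (blacks : List (Int × Int)) (r c : Int) :
    creates_short_word_py size blacks r c = creates_short_word_py_alt size blacks r c := by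
  have K := key size blacks (size.toNat)
  have hIf : ∀ (p : Prop) [Decidable p] (b : Bool), (if p then true else b) = (decide p || b) := by
    intro p _ b; split_ifs with h <;> simp [h]
  simp only [creates_short_word_py, dirCheckA, hIf, Bool.or_false]
  rw [K, K, K, K]
  simp only [creates_short_word_py_alt, List.any, shortInDir_eq, Bool.or_false]
  simp only [neg_zero, sub_zero, add_zero, ← sub_eq_add_neg]
  generalize segShort size blacks r (c - 1) 0 (-1) = b1
  generalize segShort size blacks r (c + 1) 0 1 = b2
  generalize segShort size blacks (r - 1) c (-1) 0 = b3
  generalize segShort size blacks (r + 1) c 1 0 = b4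
  cases b1 <;> cases b2 <;> cases b3 <;> cases b4 <;> rfl

-- ===== VERDICT (by name: the statement is the Claim_ definition above) =====
theorem creates_short_word_py_spec : Claim_equal_creates_short_word_py := by
  intro size blacks r c _
  unfold Spec_creates_short_word_py
  exact creates_short_word_py_spec_aux size blacks r c
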